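-- pv_equiv track=rewrite | github.com/Hassan-Raza-Shaikh/Python | Random checks/rafay_code3.py | count_hashtag_blocks
-- ===== SOURCE A (Python) =====
-- def count_hashtag_blocks(timeline):
--     """Return list of (start, end) indices of hashtag blocks."""
--     blocks = []
--     i = 0
--     while i < len(timeline):
--         if timeline[i] == '#':
--             start = i
--             while i < len(timeline) and timeline[i] == '#':
--                 i += 1
--             end = i - 1
--             blocks.append((start, end))
--         else:
--             i += 1
--     return blocks
-- ===== SOURCE B (Python) =====
-- def count_hashtag_blocks(timeline):
--     """Return list of (start, end) indices of hashtag blocks."""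
--     blocks = []
--     start = None
--     for i, ch in enumerate(timeline):
--         if ch == '#':
--             if start is None:
--                 start = i
--         elif start is not None:
--             blocks.append((start, i - 1))
--             start = None
--     if start is not None:
--         blocks.append((start, len(timeline) - 1))
--     return blocks
-- ===== Notes on version B (the rewrite author's own statement) =====
-- stated objective: idiomatic
-- what changed: Replaced the nested index-driven while loops with a single enumerate pass carrying an optional current-block start and a final flush, eliminating the inner scan and per-index string indexing.
import Mathlib
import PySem

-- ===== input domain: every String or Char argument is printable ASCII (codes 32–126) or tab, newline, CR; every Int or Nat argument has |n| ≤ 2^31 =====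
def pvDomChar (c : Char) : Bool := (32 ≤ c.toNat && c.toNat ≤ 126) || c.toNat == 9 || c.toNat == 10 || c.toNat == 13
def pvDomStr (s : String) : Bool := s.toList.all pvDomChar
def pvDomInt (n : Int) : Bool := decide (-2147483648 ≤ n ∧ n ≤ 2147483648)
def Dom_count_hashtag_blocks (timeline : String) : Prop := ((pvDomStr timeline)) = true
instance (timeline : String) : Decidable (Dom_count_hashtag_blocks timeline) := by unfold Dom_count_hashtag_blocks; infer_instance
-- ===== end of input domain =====

-- B replaces A's nested while loops by a single pass with an optional current-block
-- start and a final flush (idiomatic decomposition; same asymptotic cost).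

-- ===== PORT A =====
-- inner 'while i < len(timeline) and timeline[i] == '#': i += 1' — returns the final i
def chbInner (cs : List Char) (i : Nat) : Nat :=
  if h : i < cs.length then
    if cs[i] = '#' then chbInner cs (i + 1) else i
  else i
termination_by cs.length - i
decreasing_by omega

-- needed for termination of the outer loop
theorem chbInner_ge (cs : List Char) (i : Nat) : i ≤ chbInner cs i := by
  fun_induction chbInner <;> omega

-- outer 'while i < len(timeline)'
def chbOuter (cs : List Char) (i : Nat) : List (Int × Int) :=
  if h : i < cs.length then
    if hc : cs[i] = '#' then
      ((i : Int), (chbInner cs i : Int) - 1) :: chbOuter cs (chbInner cs i)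
    else
      chbOuter cs (i + 1)
  else []
termination_by cs.length - i
decreasing_by
  · have h1 : chbInner cs i = chbInner cs (i + 1) := by
      rw [chbInner]; simp [h, hc]
    have h2 := chbInner_ge cs (i + 1)
    omega
  · omega

def count_hashtag_blocks (timeline : String) : List (Int × Int) :=
  chbOuter timeline.toList 0

-- ===== PORT B =====
-- one step of the enumerate loop: state = (blocks, optional start of current block)
def chbStep (acc : List (Int × Int) × Option Int) (p : Int × Char) :
    List (Int × Int) × Option Int :=
  if p.2 = '#' then
    match acc.2 with
    | none => (acc.1, some p.1)
    | some s => (acc.1, some s)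
  else
    match acc.2 with
    | some s => (acc.1 ++ [(s, p.1 - 1)], none)
    | none => (acc.1, none)

def count_hashtag_blocks_alt (timeline : String) : List (Int × Int) :=
  let cs := timeline.toList
  let res := (PySem.List.enumerate cs 0).foldl chbStep ([], none)
  match res.2 with
  | some s => res.1 ++ [(s, (cs.length : Int) - 1)]
  | none => res.1

-- ===== PRECONDITION & SPEC =====
def Spec_count_hashtag_blocks (timeline : String) (out : List (Int × Int)) : Prop := out = count_hashtag_blocks_alt timeline
instance (timeline : String) (out : List (Int × Int)) : Decidable (Spec_count_hashtag_blocks timeline out) := by unfold Spec_count_hashtag_blocks; infer_instance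

-- ===== CLAIM (what is proved, stated in full; the proofs are below) =====
def Claim_equal_count_hashtag_blocks : Prop := ∀ (timeline : String), Dom_count_hashtag_blocks timeline → Spec_count_hashtag_blocks timeline (count_hashtag_blocks timeline)

-- ===== LEMMAS AND PROOFS =====

-- what A produces from position i when B's state carries `start`
def chbCont (cs : List Char) (start : Option Int) (i : Nat) : List (Int × Int) :=
  match start with
  | none => chbOuter cs i
  | some s => (s, (chbInner cs i : Int) - 1) :: chbOuter cs (chbInner cs i)

-- the flush applied after the fold
def chbFlush (cs : List Char) (res : List (Int × Int) × Option Int) : List (Int × Int) :=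
  match res.2 with
  | some s => res.1 ++ [(s, (cs.length : Int) - 1)]
  | none => res.1

theorem chbMain (cs : List Char) :
    ∀ (k i : Nat) (blocks : List (Int × Int)) (start : Option Int),
      cs.length - i ≤ k → i ≤ cs.length →
      chbFlush cs (List.foldl chbStep (blocks, start)
        (PySem.List.enumerate (cs.drop i) (i : Int)))
      = blocks ++ chbCont cs start i := by
  intro k
  induction k with
  | zero =>
    intro i blocks start hk hi
    have hi' : i = cs.length := by omega
    subst hi'
    have hinner : chbInner cs cs.length = cs.length := by
      rw [chbInner]; simp
    have houter : chbOuter cs cs.length = [] := by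
      rw [chbOuter]; simp
    cases start <;>
      simp [List.drop_length, chbFlush, chbCont, hinner, houter]
  | succ k ih =>
    intro i blocks start hk hi
    by_cases hlt : i < cs.length
    · have hdrop : cs.drop i = cs[i] :: cs.drop (i + 1) :=
        (List.getElem_cons_drop hlt).symm
      have henum : PySem.List.enumerate (cs.drop i) (i : Int)
          = ((i : Int), cs[i]) :: PySem.List.enumerate (cs.drop (i + 1)) ((i : Nat) + 1 : Nat) := by
        rw [hdrop, PySem.List.enumerate_cons]; push_cast; ring_nf
      by_cases hc : cs[i] = '#'
      · have hinner1 : chbInner cs i = chbInner cs (i + 1) := by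
          rw [chbInner]; simp [hlt, hc]
        cases start with
        | none =>
          have hstep : chbStep (blocks, none) ((i : Int), cs[i]) = (blocks, some (i : Int)) := by
            simp [chbStep, hc]
          rw [henum, List.foldl_cons, hstep,
            ih (i + 1) blocks (some (i : Int)) (by omega) (by omega)]
          have houter : chbOuter cs i
              = ((i : Int), (chbInner cs i : Int) - 1) :: chbOuter cs (chbInner cs i) := by
            rw [chbOuter]; simp [hlt, hc]
          simp [chbCont, houter, hinner1]
        | some s =>
          have hstep : chbStep (blocks, some s) ((i : Int), cs[i]) = (blocks, some s) := by
            simp [chbStep, hc]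
          rw [henum, List.foldl_cons, hstep,
            ih (i + 1) blocks (some s) (by omega) (by omega)]
          simp [chbCont, hinner1]
      · have houter : chbOuter cs i = chbOuter cs (i + 1) := by
          rw [chbOuter]; simp [hlt, hc]
        cases start with
        | none =>
          have hstep : chbStep (blocks, none) ((i : Int), cs[i]) = (blocks, none) := by
            simp [chbStep, hc]
          rw [henum, List.foldl_cons, hstep,
            ih (i + 1) blocks none (by omega) (by omega)]
          simp [chbCont, houter]
        | some s =>
          have hinner0 : chbInner cs i = i := by
            rw [chbInner]; simp [hc]
          have hstep : chbStep (blocks, some s) ((i : Int), cs[i])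
              = (blocks ++ [(s, (i : Int) - 1)], none) := by
            simp [chbStep, hc]
          rw [henum, List.foldl_cons, hstep,
            ih (i + 1) (blocks ++ [(s, (i : Int) - 1)]) none (by omega) (by omega)]
          simp [chbCont, hinner0, houter]
    · exact ih i blocks start (by omega) hi
-- ===== VERDICT (by name: the statement is the Claim_ definition above) =====
theorem count_hashtag_blocks_spec : Claim_equal_count_hashtag_blocks := by
  intro timeline _
  unfold Spec_count_hashtag_blocks count_hashtag_blocks count_hashtag_blocks_alt
  have h := chbMain timeline.toList timeline.toList.length 0 [] none (by omega) (by omega)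
  simp only [List.drop_zero, Nat.cast_zero] at h
  simpa [chbFlush, chbCont] using h.symm
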